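-- pv_equiv track=rewrite | github.com/KachiEjim/alx-higher_level_programming | 0x03-python-data_structures/1-element_at.py | element_at
-- ===== SOURCE A (Python) =====
-- def element_at(my_list, idx):
--     if idx >= 0:
--         i = 0
--         for item in my_list:
--             if i == idx:
--                 return(item)
--             i += 1
--
--     return ("None")
-- ===== SOURCE B (Python) =====
-- def element_at(my_list, idx):
--     if 0 <= idx < len(my_list):
--         return my_list[idx]
--     return "None"
-- ===== Notes on version B (the rewrite author's own statement) =====
-- stated objective: simpler
-- what changed: replaces A's linear scan with a manual counter by a single bounds-checked direct index access
import Mathlib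
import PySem

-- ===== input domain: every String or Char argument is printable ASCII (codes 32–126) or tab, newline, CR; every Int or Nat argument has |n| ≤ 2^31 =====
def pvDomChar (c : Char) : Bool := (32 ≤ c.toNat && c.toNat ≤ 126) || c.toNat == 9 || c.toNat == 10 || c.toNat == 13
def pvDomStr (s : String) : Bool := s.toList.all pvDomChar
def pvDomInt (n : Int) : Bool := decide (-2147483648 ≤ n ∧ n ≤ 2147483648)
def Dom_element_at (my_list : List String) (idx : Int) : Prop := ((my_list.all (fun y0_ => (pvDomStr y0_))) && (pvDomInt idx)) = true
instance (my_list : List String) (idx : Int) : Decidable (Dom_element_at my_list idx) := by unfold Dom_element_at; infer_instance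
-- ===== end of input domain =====

-- B replaces A's linear scan with a manual counter by a single bounds-checked direct index access (simpler).


-- ===== PORT A =====
-- the 'for item in my_list' loop with counter i; returns some item on the early return
def elemLoopA (idx : Int) : List String → Int → Option String
  | [], _ => none
  | item :: rest, i => if i = idx then some item else elemLoopA idx rest (i + 1)

def element_at (my_list : List String) (idx : Int) : String :=
  if idx ≥ 0 then
    match elemLoopA idx my_list 0 with
    | some item => item
    | none => "None"
  else "None"

-- ===== PORT B =====
def element_at_alt (my_list : List String) (idx : Int) : String :=
  if 0 ≤ idx ∧ idx < (my_list.length : Int) then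
    (PySem.List.pyGet? my_list idx).getD "None"
  else "None"

-- ===== PRECONDITION & SPEC =====
def Spec_element_at (my_list : List String) (idx : Int) (out : String) : Prop := out = element_at_alt my_list idx
instance (my_list : List String) (idx : Int) (out : String) : Decidable (Spec_element_at my_list idx out) := by unfold Spec_element_at; infer_instance

-- ===== CLAIM (what is proved, stated in full; the proofs are below) =====
def Claim_equal_element_at : Prop := ∀ (my_list : List String) (idx : Int), Dom_element_at my_list idx → Spec_element_at my_list idx (element_at my_list idx)

-- ===== LEMMAS AND PROOFS =====
theorem elemLoopA_eq (l : List String) : ∀ (idx i : Int), i ≤ idx →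
    elemLoopA idx l i = l[(idx - i).toNat]? := by
  induction l with
  | nil => intro idx i _; simp [elemLoopA]
  | cons a t ih =>
    intro idx i hle
    by_cases h : i = idx
    · subst h; simp [elemLoopA]
    · have h1 : i + 1 ≤ idx := by omega
      have h2 : (idx - i).toNat = (idx - (i + 1)).toNat + 1 := by omega
      simp [elemLoopA, h, ih idx (i + 1) h1, h2]

theorem element_at_eq_alt (my_list : List String) (idx : Int) :
    element_at my_list idx = element_at_alt my_list idx := by
  unfold element_at element_at_alt
  by_cases hn : 0 ≤ idx
  · rw [elemLoopA_eq my_list idx 0 hn]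
    by_cases hlt : idx < (my_list.length : Int)
    · have hidx : (idx - 0).toNat < my_list.length := by omega
      rw [PySem.List.pyGet?_eq_some_getElem (h0 := hn) (h1 := hlt)]
      simp [hn, hlt]
    · have : my_list.length ≤ (idx - 0).toNat := by omega
      simp [hn, hlt]
  · simp [hn]

-- ===== VERDICT (by name: the statement is the Claim_ definition above) =====
theorem element_at_spec : Claim_equal_element_at := by
  intro my_list idx _
  exact element_at_eq_alt my_list idx
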